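-- pv_equiv track=rewrite | github.com/NLPProjectGroup34/CSCI-544-GROUP-34 | Latent_Semantic_Analysis/lsa_for_stack_data_train.py | create_word_doc
-- ===== SOURCE A (Python) =====
-- def create_word_doc(vocabulary, doc_term_matrix):
--     word_doc={}
--     count = 0
--     for word in vocabulary:
--         word_occurance=0
--         for item in doc_term_matrix:
--             word_occurance+=item[count]
--         word_doc[vocabulary[count]] = word_occurance
--         count += 1
--     return word_doc
-- ===== SOURCE B (Python) =====
-- def create_word_doc(vocabulary, doc_term_matrix):
--     n = len(vocabulary)
--     sums = [0] * n
--     for row in doc_term_matrix: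
--         sums = [sums[i] + row[i] for i in range(n)]
--     return {word: sums[i] for i, word in enumerate(vocabulary)}
-- ===== Notes on version B (the rewrite author's own statement) =====
-- stated objective: alternative
-- what changed: A scans the whole matrix once per vocabulary word (column-outer, manual counter); B makes a single row-outer pass that accumulates a vector of per-column sums and then builds the dict from vocabulary with enumerate.
import Mathlib
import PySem

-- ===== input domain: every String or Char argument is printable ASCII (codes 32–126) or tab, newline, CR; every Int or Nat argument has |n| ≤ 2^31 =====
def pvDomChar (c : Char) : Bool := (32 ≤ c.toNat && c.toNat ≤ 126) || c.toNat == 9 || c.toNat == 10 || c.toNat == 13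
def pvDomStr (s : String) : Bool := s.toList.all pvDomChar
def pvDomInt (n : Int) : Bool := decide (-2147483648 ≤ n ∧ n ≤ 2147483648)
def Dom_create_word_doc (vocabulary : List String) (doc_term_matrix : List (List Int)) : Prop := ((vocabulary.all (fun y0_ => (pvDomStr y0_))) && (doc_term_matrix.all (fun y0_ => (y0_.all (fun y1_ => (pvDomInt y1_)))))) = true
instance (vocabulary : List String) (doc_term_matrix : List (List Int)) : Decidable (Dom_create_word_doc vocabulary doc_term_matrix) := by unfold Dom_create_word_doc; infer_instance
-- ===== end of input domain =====

-- B replaces A's column-outer nested scan (manual counter, one pass over all rows per word)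
-- by a single row-outer pass accumulating a vector of column sums; objective: alternative decomposition.

-- ===== PORT A =====
def create_word_doc (vocabulary : List String) (doc_term_matrix : List (List Int)) : List (String × Int) :=
  (vocabulary.foldl
    (fun (st : PySem.Dict String Int × Nat) _word =>
      let word_occurance := doc_term_matrix.foldl
        (fun acc item => acc + PySem.List.pyGetD item (st.2 : Int) 0) 0
      (st.1.insert (PySem.List.pyGetD vocabulary (st.2 : Int) "") word_occurance, st.2 + 1))
    (PySem.Dict.empty, 0)).1.items

-- ===== PORT B =====
def create_word_doc_alt (vocabulary : List String) (doc_term_matrix : List (List Int)) : List (String × Int) :=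
  let n := vocabulary.length
  let sums := doc_term_matrix.foldl
    (fun sums row => (List.range n).map
      (fun (i : Nat) => PySem.List.pyGetD sums (i : Int) 0 + PySem.List.pyGetD row (i : Int) 0))
    (List.replicate n (0 : Int))
  ((PySem.List.enumerate vocabulary).foldl
    (fun (d : PySem.Dict String Int) iw => d.insert iw.2 (PySem.List.pyGetD sums iw.1 0))
    PySem.Dict.empty).items

-- ===== PRECONDITION & SPEC =====
-- Pre_ excludes only ragged inputs (some row shorter than the vocabulary), on which the
-- Python A raises IndexError (item[count]); Python B raises IndexError there as well.
def Pre_create_word_doc (vocabulary : List String) (doc_term_matrix : List (List Int)) : Prop :=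
  ∀ row ∈ doc_term_matrix, vocabulary.length ≤ row.length
instance (vocabulary : List String) (doc_term_matrix : List (List Int)) : Decidable (Pre_create_word_doc vocabulary doc_term_matrix) := by unfold Pre_create_word_doc; infer_instance
def pvWitness_create_word_doc : List String × List (List Int) := (["a", "b"], [[1, 2], [3, 4, 5]])

def Spec_create_word_doc (vocabulary : List String) (doc_term_matrix : List (List Int)) (out : List (String × Int)) : Prop := out = create_word_doc_alt vocabulary doc_term_matrix
instance (vocabulary : List String) (doc_term_matrix : List (List Int)) (out : List (String × Int)) : Decidable (Spec_create_word_doc vocabulary doc_term_matrix out) := by unfold Spec_create_word_doc; infer_instance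

-- ===== CLAIM (what is proved, stated in full; the proofs are below) =====
def Claim_equal_create_word_doc : Prop := ∀ (vocabulary : List String) (doc_term_matrix : List (List Int)), Dom_create_word_doc vocabulary doc_term_matrix → Pre_create_word_doc vocabulary doc_term_matrix → Spec_create_word_doc vocabulary doc_term_matrix (create_word_doc vocabulary doc_term_matrix)

-- ===== LEMMAS AND PROOFS =====

-- sum of column i over the rows of m (exactly A's inner loop)
def pvColsum (m : List (List Int)) (i : Nat) : Int :=
  m.foldl (fun acc item => acc + PySem.List.pyGetD item (i : Int) 0) 0

theorem pvColsum_cons (row : List Int) (m : List (List Int)) (i : Nat) :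
    pvColsum (row :: m) i = PySem.List.pyGetD row (i : Int) 0 + pvColsum m i := by
  simp [pvColsum, List.foldl_cons, PySem.List.foldl_add]

-- the canonical index loop both programs reduce to
def pvStep (vocabulary : List String) (m : List (List Int))
    (d : PySem.Dict String Int) (i : Nat) : PySem.Dict String Int :=
  d.insert (PySem.List.pyGetD vocabulary (i : Int) "") (pvColsum m i)

-- A's loop, generalized over the starting counter and dict
theorem pvA_loop (vocabulary : List String) (m : List (List Int)) :
    ∀ (l : List String) (c : Nat) (d : PySem.Dict String Int),
      l.foldl
        (fun (st : PySem.Dict String Int × Nat) _word =>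
          let word_occurance := m.foldl
            (fun acc item => acc + PySem.List.pyGetD item (st.2 : Int) 0) 0
          (st.1.insert (PySem.List.pyGetD vocabulary (st.2 : Int) "") word_occurance, st.2 + 1))
        (d, c)
      = ((List.range' c l.length).foldl (pvStep vocabulary m) d, c + l.length) := by
  intro l
  induction l with
  | nil => intro c d; simp
  | cons w l ih =>
      intro c d
      simp only [List.foldl_cons, List.length_cons, List.range'_succ, ih]
      exact congrArg₂ Prod.mk rfl (by omega)

-- B's accumulator after folding the rows: entry i holds start[i] plus the column-i sum
theorem pvSums_spec (n : Nat) :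
    ∀ (rows : List (List Int)) (s : List Int), s.length = n →
      rows.foldl
        (fun sums row => (List.range n).map
          (fun (i : Nat) => PySem.List.pyGetD sums (i : Int) 0 + PySem.List.pyGetD row (i : Int) 0)) s
      = (List.range n).map (fun (i : Nat) => PySem.List.pyGetD s (i : Int) 0 + pvColsum rows i) := by
  intro rows
  induction rows with
  | nil =>
      intro s hs
      apply List.ext_getElem (by simp [hs])
      intro i h1 h2
      simp only [List.getElem_map, List.getElem_range, pvColsum, List.foldl_nil,
        PySem.List.pyGetD_natCast, add_zero]
      subst hs
      exact (List.getD_eq_getElem s 0 h1).symm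
  | cons row rows ih =>
      intro s hs
      simp only [List.foldl_cons]
      rw [ih _ (by simp)]
      apply List.map_congr_left
      intro i hi
      have hin : i < n := List.mem_range.mp hi
      rw [PySem.List.pyGetD_natCast, PySem.List.getD_map_range _ _ _ _ hin,
        pvColsum_cons, add_assoc, PySem.List.pyGetD_natCast]

-- B's dict loop, generalized: folding enumerate of a suffix of the vocabulary
theorem pvB_loop (vocabulary : List String) (m : List (List Int)) (sums : List Int)
    (hsums : ∀ i, i < vocabulary.length → PySem.List.pyGetD sums (i : Int) 0 = pvColsum m i) :
    ∀ (l : List String) (c : Nat), vocabulary.drop c = l →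
      ∀ (d : PySem.Dict String Int),
        (PySem.List.enumerate l (c : Int)).foldl
          (fun (d : PySem.Dict String Int) iw => d.insert iw.2 (PySem.List.pyGetD sums iw.1 0)) d
        = (List.range' c l.length).foldl (pvStep vocabulary m) d := by
  intro l
  induction l with
  | nil => intro c _ d; simp
  | cons w l ih =>
      intro c hdrop d
      have hc : c < vocabulary.length := by
        by_contra h
        rw [List.drop_eq_nil_of_le (by omega)] at hdrop
        exact List.cons_ne_nil w l hdrop.symm
      have hw : vocabulary[c] = w := by
        have h0 : (vocabulary.drop c)[0]? = vocabulary[c + 0]? := List.getElem?_drop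
        simp [hdrop, List.getElem?_eq_getElem hc] at h0
        exact h0.symm
      have hdrop' : vocabulary.drop (c + 1) = l := by
        have := congrArg (List.drop 1) hdrop
        simpa [List.drop_drop] using this
      rw [PySem.List.enumerate_cons]
      simp only [List.foldl_cons, List.length_cons, List.range'_succ]
      have hcast : (c : Int) + 1 = ((c + 1 : Nat) : Int) := by push_cast; ring
      rw [hcast, ih (c + 1) hdrop' _]
      congr 1
      simp only [pvStep, hsums c hc, PySem.List.pyGetD_natCast]
      rw [List.getD_eq_getElem _ _ hc, hw]

-- ===== VERDICT (by name: the statement is the Claim_ definition above) =====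
theorem create_word_doc_spec : Claim_equal_create_word_doc := by
  intro vocabulary doc_term_matrix _ _
  unfold Spec_create_word_doc
  simp only [create_word_doc, create_word_doc_alt]
  rw [pvA_loop vocabulary doc_term_matrix vocabulary 0 PySem.Dict.empty]
  rw [show PySem.List.enumerate vocabulary = PySem.List.enumerate vocabulary ((0 : Nat) : Int) from by norm_num,
    pvB_loop vocabulary doc_term_matrix _ ?_ vocabulary 0 rfl PySem.Dict.empty]
  intro i hi
  rw [pvSums_spec vocabulary.length doc_term_matrix (List.replicate vocabulary.length 0)
    (List.length_replicate), PySem.List.pyGetD_natCast,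
    PySem.List.getD_map_range _ _ _ _ hi, PySem.List.pyGetD_natCast]
  simp
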